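-- pv_equiv track=rewrite | github.com/MDhewei/protiler | ProTiler/ProTiler_predict.py | GetGenomicLocation
-- ===== SOURCE A (Python) =====
-- import math,os,json,logging,sys,pkg_resources
--
-- def GetGenomicLocation(exon_list,aa_pos,strand):
--     resLoc = 0; gene_loci = 0
--     for i in range(len(exon_list)):
--         resLoc += math.ceil((exon_list[i][1] - exon_list[i][0])/3)
--         if resLoc >= aa_pos:
--             if strand == '+':
--                 gene_loci = exon_list[i][1] - (resLoc - aa_pos)*3
--             else:
--                 gene_loci = exon_list[i][0] + (resLoc - aa_pos)*3
--             break
--     return gene_loci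
-- ===== SOURCE B (Python) =====
-- def GetGenomicLocation(exon_list, aa_pos, strand):
--     # Recursive decomposition: instead of accumulating a running residue count,
--     # subtract each exon's residue count from the target aa_pos as we descend.
--     if not exon_list:
--         return 0
--     s, e = exon_list[0]
--     n = -((s - e) // 3)  # exact integer ceil((e-s)/3)
--     if n >= aa_pos:
--         return e - (n - aa_pos) * 3 if strand == '+' else s + (n - aa_pos) * 3
--     return GetGenomicLocation(exon_list[1:], aa_pos - n, strand)
-- ===== Notes on version B (the rewrite author's own statement) =====
-- stated objective: alternative
-- what changed: Replaces the indexed loop with a running cumulative residue count by a recursive descent over the exon list that subtracts each exon's residue count from the target aa_pos, and computes the ceil with integer floor-division instead of math.ceil on a float.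
import Mathlib
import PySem

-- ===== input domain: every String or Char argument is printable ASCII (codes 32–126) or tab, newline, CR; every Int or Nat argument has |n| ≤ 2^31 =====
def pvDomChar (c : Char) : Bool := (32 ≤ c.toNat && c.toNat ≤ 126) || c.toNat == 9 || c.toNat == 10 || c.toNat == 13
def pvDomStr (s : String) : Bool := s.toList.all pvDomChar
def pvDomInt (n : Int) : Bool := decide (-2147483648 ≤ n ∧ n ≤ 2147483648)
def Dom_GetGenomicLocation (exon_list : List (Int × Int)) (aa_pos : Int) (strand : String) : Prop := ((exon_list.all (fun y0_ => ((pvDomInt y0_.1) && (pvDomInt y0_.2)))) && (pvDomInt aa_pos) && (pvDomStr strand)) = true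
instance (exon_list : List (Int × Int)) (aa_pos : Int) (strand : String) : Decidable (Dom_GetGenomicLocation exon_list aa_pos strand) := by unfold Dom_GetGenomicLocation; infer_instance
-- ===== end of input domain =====

-- B replaces A's running-total loop with a recursive descent that subtracts each
-- exon's residue count from the target position (objective: alternative decomposition, same cost).

-- ===== PORT A =====
-- math.ceil((e-s)/3) is exact integer ⌈(e-s)/3⌉ on the |n| ≤ 2^31 domain; ported as -((-(e-s)) fdiv 3)
def GetGenomicLocation_loopA (l : List (Int × Int)) (resLoc : Int) (aa_pos : Int) (strand : String) : Int :=
  match l with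
  | [] => 0  -- loop ends without break: gene_loci keeps its initial 0
  | (s, e) :: rest =>
    let resLoc' := resLoc + (-(PySem.Int.floordiv (-(e - s)) 3))
    if resLoc' ≥ aa_pos then
      (if strand = "+" then e - (resLoc' - aa_pos) * 3 else s + (resLoc' - aa_pos) * 3)
    else GetGenomicLocation_loopA rest resLoc' aa_pos strand
termination_by structural l

def GetGenomicLocation (exon_list : List (Int × Int)) (aa_pos : Int) (strand : String) : Int :=
  GetGenomicLocation_loopA exon_list 0 aa_pos strand

-- ===== PORT B =====
def GetGenomicLocation_alt (exon_list : List (Int × Int)) (aa_pos : Int) (strand : String) : Int :=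
  match exon_list with
  | [] => 0
  | (s, e) :: rest =>
    let n := -(PySem.Int.floordiv (s - e) 3)
    if n ≥ aa_pos then
      (if strand = "+" then e - (n - aa_pos) * 3 else s + (n - aa_pos) * 3)
    else GetGenomicLocation_alt rest (aa_pos - n) strand
termination_by structural exon_list

-- ===== PRECONDITION & SPEC =====
def Spec_GetGenomicLocation (exon_list : List (Int × Int)) (aa_pos : Int) (strand : String) (out : Int) : Prop := out = GetGenomicLocation_alt exon_list aa_pos strand
instance (exon_list : List (Int × Int)) (aa_pos : Int) (strand : String) (out : Int) : Decidable (Spec_GetGenomicLocation exon_list aa_pos strand out) := by unfold Spec_GetGenomicLocation; infer_instance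

-- ===== CLAIM (what is proved, stated in full; the proofs are below) =====
def Claim_equal_GetGenomicLocation : Prop := ∀ (exon_list : List (Int × Int)) (aa_pos : Int) (strand : String), Dom_GetGenomicLocation exon_list aa_pos strand → Spec_GetGenomicLocation exon_list aa_pos strand (GetGenomicLocation exon_list aa_pos strand)

-- ===== LEMMAS AND PROOFS =====
theorem GetGenomicLocation_loopA_eq_alt (l : List (Int × Int)) (resLoc aa_pos : Int) (strand : String) :
    GetGenomicLocation_loopA l resLoc aa_pos strand = GetGenomicLocation_alt l (aa_pos - resLoc) strand := by
  induction l generalizing resLoc aa_pos with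
  | nil => rfl
  | cons p rest ih =>
    obtain ⟨s, e⟩ := p
    simp only [GetGenomicLocation_loopA, GetGenomicLocation_alt]
    have hn : -(e - s) = s - e := by ring
    rw [hn]
    set n := -(PySem.Int.floordiv (s - e) 3) with hndef
    by_cases h : resLoc + n ≥ aa_pos
    · have h2 : n ≥ aa_pos - resLoc := by omega
      rw [if_pos h, if_pos h2]
      by_cases hs : strand = "+" <;> simp [hs] <;> ring
    · have h2 : ¬ n ≥ aa_pos - resLoc := by omega
      rw [if_neg h, if_neg h2, ih]
      congr 1; ring

-- ===== VERDICT (by name: the statement is the Claim_ definition above) =====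
theorem GetGenomicLocation_spec : Claim_equal_GetGenomicLocation := by
  intro exon_list aa_pos strand _
  unfold Spec_GetGenomicLocation GetGenomicLocation
  rw [GetGenomicLocation_loopA_eq_alt]
  norm_num
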